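-- pv_equiv track=rewrite | github.com/upperdim/minishell-devtools | quotes_algo_prot.py | handle_quotes
-- ===== SOURCE A (Python) =====
-- def filter_included_ranges(data):
--     included_ranges = []
--     for i, range1 in enumerate(data):
--         included = False
--         for j, range2 in enumerate(data):
--             if i != j:  # Skip comparing the range with itself
--                 if range1[0] >= range2[0] and range1[1] <= range2[1]:
--                     included = True
--                     break
--         if not included:
--             included_ranges.append(range1)
--     return included_ranges
--
-- ALLOW_BACKSPACE_ESCAPING = True
--
-- def double_quote_condition(line, idx, single_q_encountered):
-- 	if ALLOW_BACKSPACE_ESCAPING and idx > 0: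
-- 		return line[idx - 1] != "\\" and line[idx] == "\"" and single_q_encountered == False
-- 	else:
-- 		return line[idx] == "\"" and single_q_encountered == False
--
-- def single_quote_condition(line, idx, double_q_encountered):
-- 	if ALLOW_BACKSPACE_ESCAPING and idx > 0:
-- 		return line[idx - 1] != "\\" and line[idx] == "\'" and double_q_encountered == False
-- 	else:
-- 		return line[idx] == "\'" and double_q_encountered == False
--
-- def handle_quotes(line):
-- 	result = ""
--
-- 	double_q_encountered = False
-- 	single_q_encountered = False
-- 	double_q_open_idx = -1
-- 	single_q_open_idx = -1
--
-- 	enclosed_sections = []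
--
-- 	for idx in range(len(line)):
-- 		if double_quote_condition(line, idx, single_q_encountered):
-- 			if double_q_encountered == True:
-- 				enclosed_sections.append([double_q_open_idx, idx])
-- 				double_q_encountered = False
-- 			else:
-- 				double_q_encountered = True
-- 				double_q_open_idx = idx
-- 		if single_quote_condition(line, idx, double_q_encountered):
-- 			if single_q_encountered == True:
-- 				enclosed_sections.append([single_q_open_idx, idx])
-- 				single_q_encountered = False
-- 			else:
-- 				single_q_encountered = True
-- 				single_q_open_idx = idx
--
-- 	current_idx = 0
-- 	for enclosed_section in filter_included_ranges(enclosed_sections):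
-- 		result += line[current_idx:enclosed_section[0]]              # until enclosed section
-- 		result += line[enclosed_section[0] + 1:enclosed_section[1]]  # inside enclosed section
-- 		current_idx = enclosed_section[1] + 1                        # setup it up for after enclosed section
-- 	result += line[current_idx:len(line)]
-- 	return result
-- ===== SOURCE B (Python) =====
-- def handle_quotes(line):
--     # One-pass state machine: emit chars directly, buffering a pending quoted
--     # section and dropping its quotes when it closes (no section list, no
--     # quadratic containment filter, no slicing rebuild).
--     out = []
--     pending = []
--     q = None       # currently open quote char, or None
--     prev = None    # previous character (for backslash escaping)
--     for ch in line:
--         unescaped = prev != "\\"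
--         if q is None:
--             if unescaped and (ch == "\"" or ch == "'"):
--                 q = ch
--                 pending = []
--             else:
--                 out.append(ch)
--         elif unescaped and ch == q:
--             out.extend(pending)
--             pending = []
--             q = None
--         else:
--             pending.append(ch)
--         prev = ch
--     if q is not None:
--         out.append(q)
--         out.extend(pending)
--     return "".join(out)
-- ===== Notes on version B (the rewrite author's own statement) =====
-- stated objective: faster
-- what changed: B replaces A's three phases (index scan collecting [open,close] pairs, an O(k^2) all-pairs containment filter over them, and a slice-and-concatenate rebuild) with a single streaming state machine that emits characters directly, buffering the chars of a pending quoted section and dropping its quotes when it closes; the containment filter disappears because the scan's sections are provably disjoint and sorted.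
import Mathlib
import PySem

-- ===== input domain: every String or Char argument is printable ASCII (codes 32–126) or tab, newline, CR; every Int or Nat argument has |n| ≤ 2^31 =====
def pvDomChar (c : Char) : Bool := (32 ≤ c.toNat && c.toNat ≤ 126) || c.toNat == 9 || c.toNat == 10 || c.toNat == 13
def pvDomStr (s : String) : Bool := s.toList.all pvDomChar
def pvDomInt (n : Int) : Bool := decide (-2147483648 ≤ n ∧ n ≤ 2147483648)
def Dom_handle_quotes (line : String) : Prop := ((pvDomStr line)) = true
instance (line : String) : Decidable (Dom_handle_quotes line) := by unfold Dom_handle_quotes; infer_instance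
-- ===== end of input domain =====

-- B strips matched unescaped quote pairs in one streaming pass (no section list, no
-- quadratic containment filter, no slicing rebuild); same return value as A.

-- ===== PORT A =====
def filter_included_ranges (data : List (Int × Int)) : List (Int × Int) :=
  -- inner 'for j' loop that sets 'included' and breaks = existence over enumerate(data)
  (PySem.List.enumerate data).foldl
    (fun acc ir =>
      let included := (PySem.List.enumerate data).any
        (fun jr => decide (ir.1 ≠ jr.1) && decide (ir.2.1 ≥ jr.2.1 ∧ ir.2.2 ≤ jr.2.2))
      if included then acc else acc ++ [ir.2])
    []

def ALLOW_BACKSPACE_ESCAPING : Bool := true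

def double_quote_condition (line : String) (idx : Int) (single_q_encountered : Bool) : Bool :=
  if ALLOW_BACKSPACE_ESCAPING && decide (idx > 0) then
    decide (PySem.Str.pyGet? line (idx - 1) ≠ some '\\') &&
      decide (PySem.Str.pyGet? line idx = some '"') && (single_q_encountered == false)
  else
    decide (PySem.Str.pyGet? line idx = some '"') && (single_q_encountered == false)

def single_quote_condition (line : String) (idx : Int) (double_q_encountered : Bool) : Bool :=
  if ALLOW_BACKSPACE_ESCAPING && decide (idx > 0) then
    decide (PySem.Str.pyGet? line (idx - 1) ≠ some '\\') &&
      decide (PySem.Str.pyGet? line idx = some '\'') && (double_q_encountered == false)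
  else
    decide (PySem.Str.pyGet? line idx = some '\'') && (double_q_encountered == false)

-- the body of A's main loop; state = (double_q, single_q, double_q_open_idx, single_q_open_idx, enclosed_sections)
def hq_step (line : String) (st : Bool × Bool × Int × Int × List (Int × Int)) (idx : Int) :
    Bool × Bool × Int × Int × List (Int × Int) :=
  let dq := st.1; let sq := st.2.1; let dqi := st.2.2.1; let sqi := st.2.2.2.1; let secs := st.2.2.2.2
  let a : Bool × Int × List (Int × Int) :=
    if double_quote_condition line idx sq then
      if dq then (false, dqi, secs ++ [(dqi, idx)]) else (true, idx, secs)
    else (dq, dqi, secs)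
  let b : Bool × Int × List (Int × Int) :=
    if single_quote_condition line idx a.1 then
      if sq then (false, sqi, a.2.2 ++ [(sqi, idx)]) else (true, idx, a.2.2)
    else (sq, sqi, a.2.2)
  (a.1, b.1, a.2.1, b.2.1, b.2.2)

def handle_quotes (line : String) : String :=
  let st := (PySem.List.pyRange 0 (PySem.Str.len line) 1).foldl (hq_step line)
    (false, false, -1, -1, [])
  let fin := (filter_included_ranges st.2.2.2.2).foldl
    (fun (p : String × Int) sec =>
      (p.1 ++ PySem.Str.slice line (some p.2) (some sec.1) ++
         PySem.Str.slice line (some (sec.1 + 1)) (some sec.2),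
       sec.2 + 1))
    ("", (0 : Int))
  fin.1 ++ PySem.Str.slice line (some fin.2) (some (PySem.Str.len line))

-- ===== PORT B =====
-- streaming state machine: q = open quote (or none), pending = chars since it opened, prev = previous char
def hq_go (q : Option Char) (pending : List Char) (prev : Option Char) : List Char → List Char
  | [] => match q with
    | none => []
    | some qc => qc :: pending
  | ch :: rest =>
    let unescaped := prev ≠ some '\\'
    match q with
    | none =>
        if unescaped ∧ (ch = '"' ∨ ch = '\'') then hq_go (some ch) [] (some ch) rest
        else ch :: hq_go none [] (some ch) rest
    | some qc =>
        if unescaped ∧ ch = qc then pending ++ hq_go none [] (some ch) rest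
        else hq_go (some qc) (pending ++ [ch]) (some ch) rest

def handle_quotes_alt (line : String) : String :=
  String.ofList (hq_go none [] none line.toList)

-- ===== PRECONDITION & SPEC =====
def Spec_handle_quotes (line : String) (out : String) : Prop := out = handle_quotes_alt line
instance (line : String) (out : String) : Decidable (Spec_handle_quotes line out) := by unfold Spec_handle_quotes; infer_instance

-- ===== CLAIM (what is proved, stated in full; the proofs are below) =====
def Claim_equal_handle_quotes : Prop := ∀ (line : String), Dom_handle_quotes line → Spec_handle_quotes line (handle_quotes line)

-- ===== LEMMAS AND PROOFS =====

-- previous character seen by B's machine at position i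
def prevO (L : List Char) (i : Nat) : Option Char := if i = 0 then none else L[i-1]?

-- sections A's scan appends from index i onward, started in the given state
def tailSecs (line : String) (i : Int) (dq sq : Bool) (dqi sqi : Int) : List (Int × Int) :=
  ((PySem.List.pyRange i (PySem.Str.len line) 1).foldl (hq_step line)
    (dq, sq, dqi, sqi, [])).2.2.2.2

-- A's rebuild phase, on the character list
def rebuild (L : List Char) : Int → List (Int × Int) → List Char
  | c, [] => PySem.List.slice L (some c) (some (L.length : Int))
  | c, s :: rest =>
      PySem.List.slice L (some c) (some s.1) ++
        PySem.List.slice L (some (s.1 + 1)) (some s.2) ++ rebuild L (s.2 + 1) rest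

-- strictly ordered sections, all starting at or after m
def SecChain (m : Int) : List (Int × Int) → Prop
  | [] => True
  | s :: rest => m ≤ s.1 ∧ s.1 < s.2 ∧ SecChain (s.2 + 1) rest

lemma hq_step_split (line : String) (dq sq : Bool) (dqi sqi : Int)
    (secs : List (Int × Int)) (idx : Int) :
    hq_step line (dq, sq, dqi, sqi, secs) idx =
      ((hq_step line (dq, sq, dqi, sqi, []) idx).1,
       (hq_step line (dq, sq, dqi, sqi, []) idx).2.1,
       (hq_step line (dq, sq, dqi, sqi, []) idx).2.2.1,
       (hq_step line (dq, sq, dqi, sqi, []) idx).2.2.2.1,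
       secs ++ (hq_step line (dq, sq, dqi, sqi, []) idx).2.2.2.2) := by
  simp only [hq_step]
  split_ifs <;> simp

lemma foldl_hq_step_split (line : String) (l : List Int) :
    ∀ (dq sq : Bool) (dqi sqi : Int) (secs : List (Int × Int)),
    l.foldl (hq_step line) (dq, sq, dqi, sqi, secs) =
      ((l.foldl (hq_step line) (dq, sq, dqi, sqi, [])).1,
       (l.foldl (hq_step line) (dq, sq, dqi, sqi, [])).2.1,
       (l.foldl (hq_step line) (dq, sq, dqi, sqi, [])).2.2.1,
       (l.foldl (hq_step line) (dq, sq, dqi, sqi, [])).2.2.2.1,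
       secs ++ (l.foldl (hq_step line) (dq, sq, dqi, sqi, [])).2.2.2.2) := by
  induction l with
  | nil => intro dq sq dqi sqi secs; simp
  | cons x l ih =>
    intro dq sq dqi sqi secs
    simp only [List.foldl_cons]
    rw [hq_step_split]
    obtain ⟨a1, a2, a3, a4, a5⟩ := hq_step line (dq, sq, dqi, sqi, []) x
    rw [ih a1 a2 a3 a4 (secs ++ a5), ih a1 a2 a3 a4 a5]
    simp

lemma tailSecs_nil (line : String) (i : Nat) (dq sq : Bool) (dqi sqi : Int)
    (h : line.toList.length ≤ i) :
    tailSecs line (i : Int) dq sq dqi sqi = [] := by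
  unfold tailSecs
  rw [PySem.Str.len_eq, PySem.List.pyRange_one_eq_nil (by exact_mod_cast h)]
  rfl

lemma tailSecs_cons (line : String) (i : Nat) (dq sq : Bool) (dqi sqi : Int)
    (h : i < line.toList.length) :
    tailSecs line (i : Int) dq sq dqi sqi =
      (hq_step line (dq, sq, dqi, sqi, []) (i : Int)).2.2.2.2 ++
        tailSecs line ((i + 1 : Nat) : Int)
          (hq_step line (dq, sq, dqi, sqi, []) (i : Int)).1
          (hq_step line (dq, sq, dqi, sqi, []) (i : Int)).2.1
          (hq_step line (dq, sq, dqi, sqi, []) (i : Int)).2.2.1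
          (hq_step line (dq, sq, dqi, sqi, []) (i : Int)).2.2.2.1 := by
  unfold tailSecs
  rw [PySem.Str.len_eq, PySem.List.pyRange_one_cons (by exact_mod_cast h)]
  simp only [List.foldl_cons]
  obtain ⟨a1, a2, a3, a4, a5⟩ := hq_step line (dq, sq, dqi, sqi, []) (i : Int)
  rw [foldl_hq_step_split]
  have : ((i : Int) + 1) = ((i + 1 : Nat) : Int) := by push_cast; ring
  rw [this]

lemma pyGet?_toList (line : String) (i : Nat) :
    PySem.Str.pyGet? line (i : Int) = line.toList[i]? := by
  rw [PySem.Str.pyGet?_eq]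
  exact PySem.List.pyGet?_natCast _ i

lemma dcond_eq (line : String) (i : Nat) (sq : Bool) :
    double_quote_condition line (i : Int) sq =
      (decide (prevO line.toList i ≠ some '\\') &&
        decide (line.toList[i]? = some '"') && (sq == false)) := by
  unfold double_quote_condition ALLOW_BACKSPACE_ESCAPING prevO
  have h0 := pyGet?_toList line i
  rcases Nat.eq_zero_or_pos i with rfl | hpos
  · rw [if_neg (by simp), if_pos rfl]
    push_cast at h0
    rw [PySem.Str.pyGet?_eq] at h0 ⊢
    simp only [PySem.Chars.pyGet?] at h0
    simp [h0]
  · have h1 : decide ((i : Int) > 0) = true := by simp; exact_mod_cast hpos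
    have h2 : (i : Int) - 1 = ((i - 1 : Nat) : Int) := by omega
    rw [if_pos (by simp only [Bool.and_eq_true, h1, and_true]), if_neg (by omega), h2,
      pyGet?_toList, pyGet?_toList]

lemma scond_eq (line : String) (i : Nat) (dq : Bool) :
    single_quote_condition line (i : Int) dq =
      (decide (prevO line.toList i ≠ some '\\') &&
        decide (line.toList[i]? = some '\'') && (dq == false)) := by
  unfold single_quote_condition ALLOW_BACKSPACE_ESCAPING prevO
  have h0 := pyGet?_toList line i
  rcases Nat.eq_zero_or_pos i with rfl | hpos
  · rw [if_neg (by simp), if_pos rfl]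
    push_cast at h0
    rw [PySem.Str.pyGet?_eq] at h0 ⊢
    simp only [PySem.Chars.pyGet?] at h0
    simp [h0]
  · have h1 : decide ((i : Int) > 0) = true := by simp; exact_mod_cast hpos
    have h2 : (i : Int) - 1 = ((i - 1 : Nat) : Int) := by omega
    rw [if_pos (by simp only [Bool.and_eq_true, h1, and_true]), if_neg (by omega), h2,
      pyGet?_toList, pyGet?_toList]

lemma prevO_succ (L : List Char) (i : Nat) (ch : Char) (h : L[i]? = some ch) :
    prevO L (i + 1) = some ch := by
  simp [prevO, h]

lemma drop_cons_get? (L : List Char) (d : Nat) (qc : Char) (h : L[d]? = some qc) :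
    L.drop d = qc :: L.drop (d + 1) := by
  obtain ⟨hlt, heq⟩ := List.getElem?_eq_some_iff.mp h
  rw [← List.getElem_cons_drop hlt, heq]

lemma take_snoc (L : List Char) (c i : Nat) (ch : Char) (hc : c ≤ i) (h : L[i]? = some ch) :
    (L.drop c).take (i + 1 - c) = (L.drop c).take (i - c) ++ [ch] := by
  have hg : (L.drop c)[i - c]? = some ch := by
    rw [List.getElem?_drop]; rwa [Nat.add_sub_cancel' hc]
  rw [show i + 1 - c = (i - c) + 1 by omega, List.take_add_one, hg]
  rfl

lemma take_all_drop (L : List Char) (c : Nat) :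
    (L.drop c).take (L.length - c) = L.drop c := by
  apply List.take_of_length_le; simp

lemma drop_split (L : List Char) (c d : Nat) (qc : Char) (hc : c ≤ d) (h : L[d]? = some qc) :
    L.drop c = (L.drop c).take (d - c) ++ qc :: L.drop (d + 1) := by
  conv_lhs => rw [← List.take_append_drop (d - c) (L.drop c)]
  rw [List.drop_drop, show c + (d - c) = d by omega, drop_cons_get? L d qc h]

-- main simulation lemma: A's scan+rebuild from index i equals B's machine from index i
lemma hq_main (line : String) (k : Nat) :
    ∀ (i c : Nat) (dq sq : Bool) (dqi sqi : Int),
      line.toList.length ≤ i + k → i ≤ line.toList.length → c ≤ i →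
      ((dq = false → sq = false →
          rebuild line.toList (c : Int) (tailSecs line (i : Int) dq sq dqi sqi) =
            (line.toList.drop c).take (i - c) ++
              hq_go none [] (prevO line.toList i) (line.toList.drop i)) ∧
       (∀ (d : Nat) (qc : Char), c ≤ d → d < i → line.toList[d]? = some qc →
          ((dq = true ∧ sq = false ∧ qc = '"' ∧ dqi = (d : Int)) ∨
           (dq = false ∧ sq = true ∧ qc = '\'' ∧ sqi = (d : Int))) →
          rebuild line.toList (c : Int) (tailSecs line (i : Int) dq sq dqi sqi) =
            (line.toList.drop c).take (d - c) ++
              hq_go (some qc) ((line.toList.drop (d + 1)).take (i - (d + 1)))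
                (prevO line.toList i) (line.toList.drop i))) := by
  induction k with
  | zero =>
    intro i c dq sq dqi sqi hk hi hc
    have hin : i = line.toList.length := by omega
    subst hin
    rw [tailSecs_nil line _ _ _ _ _ (le_refl _)]
    have hdropn : line.toList.drop line.toList.length = [] :=
      List.drop_of_length_le (le_refl _)
    constructor
    · intro _ _
      rw [hdropn]
      simp only [rebuild, hq_go, List.append_nil]
      rw [PySem.List.slice_natCast, take_all_drop]
    · intro d qc hcd hdi hchd _
      rw [hdropn]
      simp only [rebuild, hq_go]
      rw [PySem.List.slice_natCast, take_all_drop,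
        show line.toList.length - (d + 1) = (line.toList).length - (d + 1) from rfl]
      rw [take_all_drop]
      exact drop_split line.toList c d qc hcd hchd
  | succ k ih =>
    intro i c dq sq dqi sqi hk hi hc
    by_cases hlt : i < line.toList.length
    case neg =>
      have hin : i = line.toList.length := by omega
      subst hin
      rw [tailSecs_nil line _ _ _ _ _ (le_refl _)]
      have hdropn : line.toList.drop line.toList.length = [] :=
        List.drop_of_length_le (le_refl _)
      constructor
      · intro _ _
        rw [hdropn]
        simp only [rebuild, hq_go, List.append_nil]
        rw [PySem.List.slice_natCast, take_all_drop]
      · intro d qc hcd hdi hchd _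
        rw [hdropn]
        simp only [rebuild, hq_go]
        rw [PySem.List.slice_natCast, take_all_drop, take_all_drop]
        exact drop_split line.toList c d qc hcd hchd
    case pos =>
    obtain ⟨ch, hch⟩ : ∃ ch, line.toList[i]? = some ch :=
      ⟨line.toList[i], List.getElem?_eq_getElem hlt⟩
    have hdrop : line.toList.drop i = ch :: line.toList.drop (i + 1) :=
      drop_cons_get? line.toList i ch hch
    have hk1 : line.toList.length ≤ (i + 1) + k := by omega
    have hi1 : i + 1 ≤ line.toList.length := by omega
    have hprev1 : prevO line.toList (i + 1) = some ch := prevO_succ _ _ _ hch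
    have hcast : ((i : Int) + 1) = ((i + 1 : Nat) : Int) := by push_cast; ring
    constructor
    · rintro rfl rfl
      rw [hdrop]
      by_cases hU : prevO line.toList i = some '\\'
      · -- escaped position: nothing happens
        have hstep : hq_step line (false, false, dqi, sqi, []) (i : Int) =
            (false, false, dqi, sqi, []) := by
          simp [hq_step, dcond_eq, scond_eq, hU]
        rw [tailSecs_cons line i _ _ _ _ hlt, hstep]
        simp only [List.nil_append, hq_go]
        rw [if_neg (by simp [hU]), ((ih (i + 1) c false false dqi sqi hk1 hi1 (by omega)).1) rfl rfl,
          hprev1, take_snoc line.toList c i ch hc hch]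
        simp
      · by_cases hdq : ch = '"'
        · subst hdq
          have hstep : hq_step line (false, false, dqi, sqi, []) (i : Int) =
              (true, false, (i : Int), sqi, []) := by
            simp [hq_step, dcond_eq, scond_eq, hU, hch]
          rw [tailSecs_cons line i _ _ _ _ hlt, hstep]
          simp only [List.nil_append, hq_go]
          rw [if_pos ⟨hU, by simp⟩,
            ((ih (i + 1) c true false (i : Int) sqi hk1 hi1 (by omega)).2) i '"' hc
              (by omega) hch (Or.inl ⟨rfl, rfl, rfl, rfl⟩), hprev1]
          simp
        · by_cases hsq : ch = '\''
          · subst hsq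
            have hstep : hq_step line (false, false, dqi, sqi, []) (i : Int) =
                (false, true, dqi, (i : Int), []) := by
              simp [hq_step, dcond_eq, scond_eq, hU, hch, hdq]
            rw [tailSecs_cons line i _ _ _ _ hlt, hstep]
            simp only [List.nil_append, hq_go]
            rw [if_pos ⟨hU, by simp⟩,
              ((ih (i + 1) c false true dqi (i : Int) hk1 hi1 (by omega)).2) i '\'' hc
                (by omega) hch (Or.inr ⟨rfl, rfl, rfl, rfl⟩), hprev1]
            simp
          · have hstep : hq_step line (false, false, dqi, sqi, []) (i : Int) =
                (false, false, dqi, sqi, []) := by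
              simp [hq_step, dcond_eq, scond_eq, hU, hch, hdq, hsq]
            rw [tailSecs_cons line i _ _ _ _ hlt, hstep]
            simp only [List.nil_append, hq_go]
            rw [if_neg (by rintro ⟨-, h | h⟩; exact hdq h; exact hsq h),
              ((ih (i + 1) c false false dqi sqi hk1 hi1 (by omega)).1) rfl rfl,
              hprev1, take_snoc line.toList c i ch hc hch]
            simp
    · rintro d qc hcd hdi hchd (⟨rfl, rfl, rfl, rfl⟩ | ⟨rfl, rfl, rfl, rfl⟩)
      · -- double-quote section open at d
        rw [hdrop]
        by_cases hcl : prevO line.toList i ≠ some '\\' ∧ ch = '"'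
        · have hstep : hq_step line (true, false, (d : Int), sqi, []) (i : Int) =
              (false, false, (d : Int), sqi, [((d : Int), (i : Int))]) := by
            simp [hq_step, dcond_eq, scond_eq, hch, hcl.1, hcl.2]
          rw [tailSecs_cons line i _ _ _ _ hlt, hstep]
          simp only [List.cons_append, List.nil_append, rebuild, hq_go]
          rw [if_pos (by exact ⟨hcl.1, hcl.2⟩)]
          have hcd1 : ((d : Int) + 1) = ((d + 1 : Nat) : Int) := by push_cast; ring
          rw [hcast, hcd1, PySem.List.slice_natCast, PySem.List.slice_natCast,
            ((ih (i + 1) (i + 1) false false (d : Int) sqi hk1 hi1 (by omega)).1) rfl rfl,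
            hprev1]
          simp
        · have hstep : hq_step line (true, false, (d : Int), sqi, []) (i : Int) =
              (true, false, (d : Int), sqi, []) := by
            rcases not_and_or.mp hcl with h | h
            · have hU : prevO line.toList i = some '\\' := by
                by_contra hcon; exact h hcon
              simp [hq_step, dcond_eq, scond_eq, hU]
            · simp [hq_step, dcond_eq, scond_eq, hch, h]
          rw [tailSecs_cons line i _ _ _ _ hlt, hstep]
          simp only [List.nil_append, hq_go]
          rw [if_neg (by rintro ⟨h1, h2⟩; exact hcl ⟨h1, h2⟩),
            ((ih (i + 1) c true false (d : Int) sqi hk1 hi1 (by omega)).2) d '"' hcd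
              (by omega) hchd (Or.inl ⟨rfl, rfl, rfl, rfl⟩), hprev1,
            take_snoc line.toList (d + 1) i ch (by omega) hch]
      · -- single-quote section open at d
        rw [hdrop]
        by_cases hcl : prevO line.toList i ≠ some '\\' ∧ ch = '\''
        · have hstep : hq_step line (false, true, dqi, (d : Int), []) (i : Int) =
              (false, false, dqi, (d : Int), [((d : Int), (i : Int))]) := by
            simp [hq_step, dcond_eq, scond_eq, hch, hcl.1, hcl.2]
          rw [tailSecs_cons line i _ _ _ _ hlt, hstep]
          simp only [List.cons_append, List.nil_append, rebuild, hq_go]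
          rw [if_pos (by exact ⟨hcl.1, hcl.2⟩)]
          have hcd1 : ((d : Int) + 1) = ((d + 1 : Nat) : Int) := by push_cast; ring
          rw [hcast, hcd1, PySem.List.slice_natCast, PySem.List.slice_natCast,
            ((ih (i + 1) (i + 1) false false dqi (d : Int) hk1 hi1 (by omega)).1) rfl rfl,
            hprev1]
          simp
        · have hstep : hq_step line (false, true, dqi, (d : Int), []) (i : Int) =
              (false, true, dqi, (d : Int), []) := by
            rcases not_and_or.mp hcl with h | h
            · have hU : prevO line.toList i = some '\\' := by
                by_contra hcon; exact h hcon
              simp [hq_step, dcond_eq, scond_eq, hU]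
            · simp [hq_step, dcond_eq, scond_eq, hch, h]
          rw [tailSecs_cons line i _ _ _ _ hlt, hstep]
          simp only [List.nil_append, hq_go]
          rw [if_neg (by rintro ⟨h1, h2⟩; exact hcl ⟨h1, h2⟩),
            ((ih (i + 1) c false true dqi (d : Int) hk1 hi1 (by omega)).2) d '\'' hcd
              (by omega) hchd (Or.inr ⟨rfl, rfl, rfl, rfl⟩), hprev1,
            take_snoc line.toList (d + 1) i ch (by omega) hch]


lemma secChain_mono (m m' : Int) (l : List (Int × Int)) (h : m' ≤ m) (hc : SecChain m l) :
    SecChain m' l := by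
  cases l with
  | nil => trivial
  | cons s rest => exact ⟨le_trans h hc.1, hc.2.1, hc.2.2⟩

lemma secChain_tail (line : String) (k : Nat) :
    ∀ (i : Nat) (dq sq : Bool) (dqi sqi : Int),
      line.toList.length ≤ i + k → i ≤ line.toList.length →
      ((dq = false → sq = false → SecChain (i : Int) (tailSecs line (i : Int) dq sq dqi sqi)) ∧
       (∀ (d : Nat), d < i →
          ((dq = true ∧ sq = false ∧ dqi = (d : Int)) ∨
           (dq = false ∧ sq = true ∧ sqi = (d : Int))) →
          SecChain (d : Int) (tailSecs line (i : Int) dq sq dqi sqi))) := by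
  induction k with
  | zero =>
    intro i dq sq dqi sqi hk hi
    have hnil : line.toList.length ≤ i := by omega
    constructor
    · intro _ _; rw [tailSecs_nil line i _ _ _ _ hnil]; trivial
    · intro d _ _; rw [tailSecs_nil line i _ _ _ _ hnil]; trivial
  | succ k ih =>
    intro i dq sq dqi sqi hk hi
    by_cases hlt : i < line.toList.length
    case neg =>
      have hnil : line.toList.length ≤ i := by omega
      constructor
      · intro _ _; rw [tailSecs_nil line i _ _ _ _ hnil]; trivial
      · intro d _ _; rw [tailSecs_nil line i _ _ _ _ hnil]; trivial
    case pos =>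
    obtain ⟨ch, hch⟩ : ∃ ch, line.toList[i]? = some ch :=
      ⟨line.toList[i], List.getElem?_eq_getElem hlt⟩
    have hk1 : line.toList.length ≤ (i + 1) + k := by omega
    have hi1 : i + 1 ≤ line.toList.length := by omega
    have hcast : ((i : Int) + 1) = ((i + 1 : Nat) : Int) := by push_cast; ring
    constructor
    · rintro rfl rfl
      by_cases hU : prevO line.toList i = some '\\'
      · have hstep : hq_step line (false, false, dqi, sqi, []) (i : Int) =
            (false, false, dqi, sqi, []) := by
          simp [hq_step, dcond_eq, scond_eq, hU]
        rw [tailSecs_cons line i _ _ _ _ hlt, hstep]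
        simp only [List.nil_append]
        exact secChain_mono _ _ _ (by exact_mod_cast Nat.le_succ i)
          (((ih (i + 1) false false dqi sqi hk1 hi1).1) rfl rfl)
      · by_cases hdq : ch = '"'
        · have hstep : hq_step line (false, false, dqi, sqi, []) (i : Int) =
              (true, false, (i : Int), sqi, []) := by
            simp [hq_step, dcond_eq, scond_eq, hU, hch, hdq]
          rw [tailSecs_cons line i _ _ _ _ hlt, hstep]
          simp only [List.nil_append]
          exact ((ih (i + 1) true false (i : Int) sqi hk1 hi1).2) i (by omega)
            (Or.inl ⟨rfl, rfl, rfl⟩)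
        · by_cases hsq : ch = '\''
          · have hstep : hq_step line (false, false, dqi, sqi, []) (i : Int) =
                (false, true, dqi, (i : Int), []) := by
              simp [hq_step, dcond_eq, scond_eq, hU, hch, hsq]
            rw [tailSecs_cons line i _ _ _ _ hlt, hstep]
            simp only [List.nil_append]
            exact ((ih (i + 1) false true dqi (i : Int) hk1 hi1).2) i (by omega)
              (Or.inr ⟨rfl, rfl, rfl⟩)
          · have hstep : hq_step line (false, false, dqi, sqi, []) (i : Int) =
                (false, false, dqi, sqi, []) := by
              simp [hq_step, dcond_eq, scond_eq, hU, hch, hdq, hsq]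
            rw [tailSecs_cons line i _ _ _ _ hlt, hstep]
            simp only [List.nil_append]
            exact secChain_mono _ _ _ (by exact_mod_cast Nat.le_succ i)
              (((ih (i + 1) false false dqi sqi hk1 hi1).1) rfl rfl)
    · rintro d hd (⟨rfl, rfl, rfl⟩ | ⟨rfl, rfl, rfl⟩)
      · -- double-quote section open at d
        by_cases hcl : prevO line.toList i ≠ some '\\' ∧ ch = '"'
        · have hstep : hq_step line (true, false, (d : Int), sqi, []) (i : Int) =
              (false, false, (d : Int), sqi, [((d : Int), (i : Int))]) := by
            simp [hq_step, dcond_eq, scond_eq, hch, hcl.1, hcl.2]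
          rw [tailSecs_cons line i _ _ _ _ hlt, hstep]
          simp only [List.cons_append, List.nil_append, SecChain]
          refine ⟨le_refl _, by exact_mod_cast hd, ?_⟩
          rw [hcast]
          exact (((ih (i + 1) false false (d : Int) sqi hk1 hi1).1) rfl rfl)
        · have hstep : hq_step line (true, false, (d : Int), sqi, []) (i : Int) =
              (true, false, (d : Int), sqi, []) := by
            rcases not_and_or.mp hcl with h | h
            · have hU : prevO line.toList i = some '\\' := by
                by_contra hc; exact h hc
              simp [hq_step, dcond_eq, scond_eq, hU]
            · simp [hq_step, dcond_eq, scond_eq, hch, h]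
          rw [tailSecs_cons line i _ _ _ _ hlt, hstep]
          simp only [List.nil_append]
          exact ((ih (i + 1) true false (d : Int) sqi hk1 hi1).2) d (by omega)
            (Or.inl ⟨rfl, rfl, rfl⟩)
      · -- single-quote section open at d
        by_cases hcl : prevO line.toList i ≠ some '\\' ∧ ch = '\''
        · have hstep : hq_step line (false, true, dqi, (d : Int), []) (i : Int) =
              (false, false, dqi, (d : Int), [((d : Int), (i : Int))]) := by
            simp [hq_step, dcond_eq, scond_eq, hch, hcl.1, hcl.2]
          rw [tailSecs_cons line i _ _ _ _ hlt, hstep]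
          simp only [List.cons_append, List.nil_append, SecChain]
          refine ⟨le_refl _, by exact_mod_cast hd, ?_⟩
          rw [hcast]
          exact (((ih (i + 1) false false dqi (d : Int) hk1 hi1).1) rfl rfl)
        · have hstep : hq_step line (false, true, dqi, (d : Int), []) (i : Int) =
              (false, true, dqi, (d : Int), []) := by
            rcases not_and_or.mp hcl with h | h
            · have hU : prevO line.toList i = some '\\' := by
                by_contra hc; exact h hc
              simp [hq_step, dcond_eq, scond_eq, hU]
            · simp [hq_step, dcond_eq, scond_eq, hch, h]
          rw [tailSecs_cons line i _ _ _ _ hlt, hstep]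
          simp only [List.nil_append]
          exact ((ih (i + 1) false true dqi (d : Int) hk1 hi1).2) d (by omega)
            (Or.inr ⟨rfl, rfl, rfl⟩)

lemma secChain_pairwise (m : Int) (l : List (Int × Int)) (h : SecChain m l) :
    (∀ p ∈ l, m ≤ p.1 ∧ p.1 < p.2) ∧ l.Pairwise (fun p q => p.2 < q.1) := by
  induction l generalizing m with
  | nil => simp
  | cons s rest ih =>
    obtain ⟨h1, h2, h3⟩ := h
    obtain ⟨ha, hb⟩ := ih (s.2 + 1) h3
    refine ⟨?_, ?_⟩
    · intro p hp'
      rcases List.mem_cons.mp hp' with rfl | hp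
      · exact ⟨h1, h2⟩
      · exact ⟨by linarith [(ha p hp).1], (ha p hp).2⟩
    · exact List.pairwise_cons.mpr ⟨fun p hp => by linarith [(ha p hp).1], hb⟩

lemma filter_id (secs : List (Int × Int))
    (h1 : ∀ p ∈ secs, p.1 < p.2)
    (h2 : secs.Pairwise (fun p q => p.2 < q.1)) :
    filter_included_ranges secs = secs := by
  unfold filter_included_ranges
  have hpw := List.pairwise_iff_getElem.mp h2
  have hfalse : ∀ ir ∈ PySem.List.enumerate secs 0,
      (PySem.List.enumerate secs 0).any
        (fun jr => decide (ir.1 ≠ jr.1) && decide (ir.2.1 ≥ jr.2.1 ∧ ir.2.2 ≤ jr.2.2)) = false := by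
    intro ir hir
    rw [List.any_eq_false]
    intro jr hjr
    obtain ⟨k, hk, rfl⟩ := (PySem.List.mem_enumerate_iff secs 0 ir).mp hir
    obtain ⟨j, hj, rfl⟩ := (PySem.List.mem_enumerate_iff secs 0 jr).mp hjr
    simp only [Bool.and_eq_true, decide_eq_true_eq, not_and, ne_eq, zero_add, Nat.cast_inj]
    intro hne hc1 hc2
    have hk1 := h1 secs[k] (List.getElem_mem hk)
    have hj1 := h1 secs[j] (List.getElem_mem hj)
    rcases Nat.lt_or_ge k j with h | h
    · have := hpw k j hk hj h
      omega
    · have hlt : j < k := by omega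
      have := hpw j k hj hk hlt
      omega
  rw [PySem.List.foldl_congr_mem _ _ (fun acc ir => acc ++ [ir.2]) _ ?_]
  · rw [PySem.List.foldl_append_singleton_eq_map]
    simp [PySem.List.map_snd_enumerate]
  · intro acc x hx
    simp only [hfalse x hx]
    simp

lemma rebuild_fold (line : String) (secs : List (Int × Int)) :
    ∀ (acc : String) (cur : Int),
      ((secs.foldl
          (fun (p : String × Int) sec =>
            (p.1 ++ PySem.Str.slice line (some p.2) (some sec.1) ++
               PySem.Str.slice line (some (sec.1 + 1)) (some sec.2),
             sec.2 + 1)) (acc, cur)).1 ++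
        PySem.Str.slice line
          (some (secs.foldl
            (fun (p : String × Int) sec =>
              (p.1 ++ PySem.Str.slice line (some p.2) (some sec.1) ++
                 PySem.Str.slice line (some (sec.1 + 1)) (some sec.2),
               sec.2 + 1)) (acc, cur)).2)
          (some (PySem.Str.len line))).toList =
      acc.toList ++ rebuild line.toList cur secs := by
  induction secs with
  | nil =>
    intro acc cur
    simp [rebuild, pysem]
  | cons s rest ih =>
    intro acc cur
    simp only [List.foldl_cons]
    rw [ih]
    simp [rebuild, pysem]

-- ===== VERDICT (by name: the statement is the Claim_ definition above) =====
theorem handle_quotes_spec : Claim_equal_handle_quotes := by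
  unfold Claim_equal_handle_quotes Spec_handle_quotes
  intro line _
  apply String.toList_inj.mp
  have hz : ((0 : Nat) : Int) = (0 : Int) := by norm_num
  have hchain : SecChain ((0 : Nat) : Int) (tailSecs line ((0 : Nat) : Int) false false (-1) (-1)) :=
    ((secChain_tail line line.toList.length 0 false false (-1) (-1) (by omega) (by omega)).1) rfl rfl
  obtain ⟨hall, hpw⟩ := secChain_pairwise _ _ hchain
  have hfilter : filter_included_ranges (tailSecs line ((0 : Nat) : Int) false false (-1) (-1)) =
      tailSecs line ((0 : Nat) : Int) false false (-1) (-1) :=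
    filter_id _ (fun p hp => (hall p hp).2) hpw
  have hmain := ((hq_main line line.toList.length 0 0 false false (-1) (-1)
    (by omega) (by omega) (le_refl _)).1) rfl rfl
  rw [hz] at hchain hfilter hmain
  simp only [prevO, List.drop_zero, Nat.sub_zero, List.take_zero,
    List.nil_append] at hmain
  simp only [handle_quotes, handle_quotes_alt]
  rw [rebuild_fold line _ "" 0]
  have hsecs : ((PySem.List.pyRange 0 (PySem.Str.len line) 1).foldl (hq_step line)
      (false, false, -1, -1, [])).2.2.2.2 = tailSecs line (0 : Int) false false (-1) (-1) := rfl
  rw [hsecs, hfilter, hmain]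
  simp
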